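-- pv_equiv track=rewrite | github.com/diam0ndkiller/alpha-elements | alpha_elements.py | recursive_dash
-- ===== SOURCE A (Python) =====
-- def recursive_dash(text: str, depth: int = 1):
--     if depth == 1:
--         return [text]
--     texts = recursive_dash(text, depth - 1)
--     output = [text]
--     for i in texts:
--         for j in range(len(i)):
--             if j == 0: continue
--             x = i[:j] + "-" + i[j:]
--             output.append(x)
--     return output
-- ===== SOURCE B (Python) =====
-- def recursive_dash(text: str, depth: int = 1):
--     # Iterative level-builder: apply the dash-insertion pass depth-1 times.
--     current = [text]
--     for _ in range(depth - 1):
--         new = [text]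
--         for i in current:
--             for j in range(1, len(i)):
--                 new.append(i[:j] + "-" + i[j:])
--         current = new
--     return current
-- ===== Notes on version B (the rewrite author's own statement) =====
-- stated objective: alternative
-- what changed: Replaces the linear recursion on depth (peeling one level per call) with an iterative bottom-up level builder that repeats the dash-insertion pass depth-1 times over an accumulator list, with no recursion and no j==0 skip (inner range starts at 1).
import Mathlib
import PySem

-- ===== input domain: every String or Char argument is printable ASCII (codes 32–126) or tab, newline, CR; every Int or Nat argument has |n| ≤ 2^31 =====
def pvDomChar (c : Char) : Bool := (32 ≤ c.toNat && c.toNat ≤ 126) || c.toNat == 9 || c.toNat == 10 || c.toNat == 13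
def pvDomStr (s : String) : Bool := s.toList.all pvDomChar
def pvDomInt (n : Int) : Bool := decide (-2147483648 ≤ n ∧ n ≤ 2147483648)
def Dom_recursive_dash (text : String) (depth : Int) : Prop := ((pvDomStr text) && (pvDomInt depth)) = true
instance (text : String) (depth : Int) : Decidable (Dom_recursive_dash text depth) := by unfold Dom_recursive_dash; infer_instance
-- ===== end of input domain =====

-- B replaces A's linear recursion on depth with an iterative level-builder (same cost, different decomposition).


-- ===== PORT A =====
-- recursion on depth, realised structurally on (depth-1).toNat (Pre_ excludes depth < 1,
-- where Python A recurses forever). i[:j] + "-" + i[j:] is ported exactly (0 ≤ j) as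
-- take/drop on the character list via PySem.List.slice.
def recA (text : String) : Nat → List String
  | 0 => [text]
  | n + 1 =>
    let texts := recA text n
    texts.foldl (fun output i =>
      (PySem.List.pyRange 0 (PySem.Str.len i) 1).foldl (fun output j =>
        if j == 0 then output
        else output ++ [String.ofList (PySem.List.slice i.toList none (some j) ++
            '-' :: PySem.List.slice i.toList (some j) none)]) output) [text]

def recursive_dash (text : String) (depth : Int) : List String :=
  recA text (depth - 1).toNat

-- ===== PORT B =====
-- iterative level builder: run the dash-insertion pass once per element of range(depth-1).
def recursive_dash_alt (text : String) (depth : Int) : List String :=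
  (PySem.List.pyRange 0 (depth - 1) 1).foldl (fun current _ =>
    current.foldl (fun new i =>
      (PySem.List.pyRange 1 (PySem.Str.len i) 1).foldl (fun new j =>
        new ++ [String.ofList (PySem.List.slice i.toList none (some j) ++
            '-' :: PySem.List.slice i.toList (some j) none)]) new) [text]) [text]

-- ===== PRECONDITION & SPEC =====
-- Pre_ excludes depth ≤ 0, on which Python A recurses forever (RecursionError); B returns [text] there.
def Pre_recursive_dash (text : String) (depth : Int) : Prop := 1 ≤ depth
instance (text : String) (depth : Int) : Decidable (Pre_recursive_dash text depth) := by unfold Pre_recursive_dash; infer_instance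
def pvWitness_recursive_dash : String × Int := ("ab", 2)

def Spec_recursive_dash (text : String) (depth : Int) (out : List String) : Prop := out = recursive_dash_alt text depth
instance (text : String) (depth : Int) (out : List String) : Decidable (Spec_recursive_dash text depth out) := by unfold Spec_recursive_dash; infer_instance

-- ===== CLAIM (what is proved, stated in full; the proofs are below) =====
def Claim_equal_recursive_dash : Prop := ∀ (text : String) (depth : Int), Dom_recursive_dash text depth → Pre_recursive_dash text depth → Spec_recursive_dash text depth (recursive_dash text depth)

-- ===== LEMMAS AND PROOFS =====

-- the common insertion expression
def ins (i : String) (j : Int) : String :=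
  String.ofList (PySem.List.slice i.toList none (some j) ++
      '-' :: PySem.List.slice i.toList (some j) none)

-- A's inner loop (range(len i) with a j==0 skip) equals B's (range(1, len i)).
lemma inner_eq (i : String) (acc : List String) :
    (PySem.List.pyRange 0 (PySem.Str.len i) 1).foldl (fun output j =>
        if j == 0 then output else output ++ [ins i j]) acc
      = (PySem.List.pyRange 1 (PySem.Str.len i) 1).foldl (fun new j =>
        new ++ [ins i j]) acc := by
  by_cases h : (PySem.Str.len i) ≤ 0
  · rw [PySem.List.pyRange_one_eq_nil h, PySem.List.pyRange_one_eq_nil (by omega : PySem.Str.len i ≤ 1)]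
    rfl
  · rw [PySem.List.pyRange_one_cons (by omega : (0:Int) < PySem.Str.len i)]
    simp only [List.foldl_cons, beq_self_eq_true, if_pos]
    apply PySem.List.foldl_congr_mem
    intro a x hx
    have := (PySem.List.mem_pyRange_one.mp hx).1
    simp only [beq_iff_eq]
    rw [if_neg (by omega)]

-- one full dash-insertion pass over a level
def step (text : String) (cur : List String) : List String :=
  cur.foldl (fun new i =>
    (PySem.List.pyRange 1 (PySem.Str.len i) 1).foldl (fun new j =>
      new ++ [ins i j]) new) [text]

lemma recA_eq_iterate (text : String) (n : Nat) :
    recA text n = (PySem.List.pyRange 0 (n : Int) 1).foldl (fun current _ => step text current) [text] := by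
  induction n with
  | zero => simp [recA, PySem.List.pyRange_one_eq_nil (le_refl (0:Int))]
  | succ n ih =>
    have hr : PySem.List.pyRange 0 ((n : Int) + 1) 1
        = PySem.List.pyRange 0 (n : Int) 1 ++ [(n : Int)] :=
      PySem.List.pyRange_one_succ_right (by positivity)
    push_cast
    rw [hr, List.foldl_append, ← ih]
    show recA text (n + 1) = step text (recA text n)
    simp only [recA, step, ins]
    congr 1
    funext output i
    exact inner_eq i output

theorem recursive_dash_spec : Claim_equal_recursive_dash := by
  intro text depth _ hpre
  show recursive_dash text depth = recursive_dash_alt text depth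
  unfold recursive_dash recursive_dash_alt
  rw [recA_eq_iterate]
  have : ((depth - 1).toNat : Int) = depth - 1 := by
    unfold Pre_recursive_dash at hpre; omega
  rw [this]
  rfl
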